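-- pv_equiv track=rewrite | github.com/simon-fu/rtun | rtun/tests/manual/run_manual_nat4_auto.py | prioritize_candidate_ips
-- ===== SOURCE A (Python) =====
-- NAT4_PREFERRED_IP = "101.40.161.229"
--
-- def prioritize_candidate_ips(ips: list[str], preferred_ip: str = NAT4_PREFERRED_IP) -> list[str]:
--     out: list[str] = []
--     seen: set[str] = set()
--     if preferred_ip in ips:
--         out.append(preferred_ip)
--         seen.add(preferred_ip)
--     for ip in ips:
--         if ip in seen:
--             continue
--         seen.add(ip)
--         out.append(ip)
--     return out
-- ===== SOURCE B (Python) =====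
-- NAT4_PREFERRED_IP = "101.40.161.229"
--
-- def prioritize_candidate_ips(ips: list[str], preferred_ip: str = NAT4_PREFERRED_IP) -> list[str]:
--     result = list(dict.fromkeys(ips))
--     if preferred_ip in result:
--         result.remove(preferred_ip)
--         result.insert(0, preferred_ip)
--     return result
-- ===== Notes on version B (the rewrite author's own statement) =====
-- stated objective: simpler
-- what changed: B dedups uniformly with dict.fromkeys and then moves the preferred IP to the front as a separate reorder step, instead of A's pre-seeding the output with the preferred IP and maintaining a manual seen-set during the loop.
import Mathlib
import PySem

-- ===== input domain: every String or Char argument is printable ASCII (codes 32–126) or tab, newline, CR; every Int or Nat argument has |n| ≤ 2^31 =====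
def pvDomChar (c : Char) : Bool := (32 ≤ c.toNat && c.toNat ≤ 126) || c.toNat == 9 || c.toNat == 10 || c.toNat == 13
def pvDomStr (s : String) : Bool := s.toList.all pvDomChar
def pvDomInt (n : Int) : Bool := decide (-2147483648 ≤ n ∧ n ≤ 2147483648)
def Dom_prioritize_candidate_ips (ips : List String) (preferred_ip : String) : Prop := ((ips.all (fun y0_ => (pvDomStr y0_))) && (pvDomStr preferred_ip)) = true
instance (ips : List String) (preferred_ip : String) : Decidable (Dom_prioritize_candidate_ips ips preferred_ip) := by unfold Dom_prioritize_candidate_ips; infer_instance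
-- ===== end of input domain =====

-- B dedups uniformly with dict.fromkeys, then moves the preferred IP to the front as a
-- separate reorder step (simpler decomposition); A pre-seeds the output with the preferred
-- IP and maintains a manual seen-set during its loop.

-- ===== PORT A =====
def prioritize_candidate_ips (ips : List String) (preferred_ip : String) : List String :=
  -- out: list, seen: set; seeded with preferred_ip when it occurs in ips
  let init : List String × PySem.Set String :=
    if ips.contains preferred_ip then
      ([preferred_ip], PySem.Set.add PySem.Set.empty preferred_ip)
    else ([], PySem.Set.empty)
  -- for ip in ips: if ip in seen: continue; seen.add(ip); out.append(ip)
  (ips.foldl (fun st ip =>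
      if PySem.Set.contains st.2 ip then st
      else (st.1 ++ [ip], PySem.Set.add st.2 ip)) init).1

-- ===== PORT B =====
def prioritize_candidate_ips_alt (ips : List String) (preferred_ip : String) : List String :=
  -- result = list(dict.fromkeys(ips))
  let result := PySem.List.dedup ips
  if result.contains preferred_ip then
    -- result.remove(preferred_ip); result.insert(0, preferred_ip)
    match PySem.List.remove? result preferred_ip with
    | some r => PySem.List.insert r 0 preferred_ip
    | none => result
  else result

-- ===== PRECONDITION & SPEC =====
def Spec_prioritize_candidate_ips (ips : List String) (preferred_ip : String) (out : List String) : Prop := out = prioritize_candidate_ips_alt ips preferred_ip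
instance (ips : List String) (preferred_ip : String) (out : List String) : Decidable (Spec_prioritize_candidate_ips ips preferred_ip out) := by unfold Spec_prioritize_candidate_ips; infer_instance

-- ===== CLAIM (what is proved, stated in full; the proofs are below) =====
def Claim_equal_prioritize_candidate_ips : Prop := ∀ (ips : List String) (preferred_ip : String), Dom_prioritize_candidate_ips ips preferred_ip → Spec_prioritize_candidate_ips ips preferred_ip (prioritize_candidate_ips ips preferred_ip)

-- ===== LEMMAS AND PROOFS =====

-- order-preserving dedup of l, skipping anything already in `seen`
def dedupEx (seen : PySem.Set String) : List String → List String
  | [] => []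
  | ip :: rest =>
      if PySem.Set.contains seen ip then dedupEx seen rest
      else ip :: dedupEx (PySem.Set.add seen ip) rest

theorem foldl_eq_dedupEx (l : List String) (out : List String) (seen : PySem.Set String) :
    (l.foldl (fun st ip =>
        if PySem.Set.contains st.2 ip then st
        else (st.1 ++ [ip], PySem.Set.add st.2 ip)) (out, seen)).1
      = out ++ dedupEx seen l := by
  induction l generalizing out seen with
  | nil => simp [dedupEx]
  | cons ip rest ih =>
    rw [List.foldl_cons]
    by_cases h : PySem.Set.contains seen ip = true
    · rw [if_pos h, ih, dedupEx, if_pos h]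
    · rw [if_neg h, ih, dedupEx, if_neg h, List.append_assoc]
      rfl

theorem dedupEx_congr (l : List String) (s t : PySem.Set String)
    (h : ∀ x, x ∈ s ↔ x ∈ t) : dedupEx s l = dedupEx t l := by
  induction l generalizing s t with
  | nil => rfl
  | cons ip rest ih =>
    have hc : PySem.Set.contains s ip = PySem.Set.contains t ip := by
      by_cases hm : ip ∈ s
      · rw [(PySem.Set.contains_iff s ip).2 hm, (PySem.Set.contains_iff t ip).2 ((h ip).1 hm)]
      · have hm' : ip ∉ t := fun hx => hm ((h ip).2 hx)
        cases hcs : PySem.Set.contains s ip with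
        | true => exact absurd ((PySem.Set.contains_iff s ip).1 hcs) hm
        | false =>
          cases hct : PySem.Set.contains t ip with
          | true => exact absurd ((PySem.Set.contains_iff t ip).1 hct) hm'
          | false => rfl
    by_cases hm : ip ∈ s
    · have ht : ip ∈ t := (h ip).1 hm
      rw [dedupEx, dedupEx, if_pos ((PySem.Set.contains_iff s ip).2 hm),
        if_pos ((PySem.Set.contains_iff t ip).2 ht), ih s t h]
    · have ht : ip ∉ t := fun hx => hm ((h ip).2 hx)
      have hcs : PySem.Set.contains s ip = false := by
        cases hcs : PySem.Set.contains s ip with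
        | true => exact absurd ((PySem.Set.contains_iff s ip).1 hcs) hm
        | false => rfl
      have hct : PySem.Set.contains t ip = false := by
        cases hct : PySem.Set.contains t ip with
        | true => exact absurd ((PySem.Set.contains_iff t ip).1 hct) ht
        | false => rfl
      rw [dedupEx, dedupEx, if_neg (by rw [hcs]; exact Bool.false_ne_true),
        if_neg (by rw [hct]; exact Bool.false_ne_true)]
      refine congrArg (ip :: ·) (ih _ _ ?_)
      intro x
      simp [PySem.Set.mem_add, h x]

theorem update_eq_dedupEx (l : List String) (s : PySem.Set String) :
    PySem.Set.update s l = s ++ dedupEx s l := by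
  induction l generalizing s with
  | nil => simp [PySem.Set.update, dedupEx]
  | cons ip rest ih =>
    by_cases h : PySem.Set.contains s ip = true
    · have hadd : PySem.Set.add s ip = s := by unfold PySem.Set.add; rw [if_pos h]
      rw [PySem.Set.update, List.foldl_cons, hadd, dedupEx, if_pos h]
      exact ih s
    · have hadd : PySem.Set.add s ip = s ++ [ip] := by unfold PySem.Set.add; rw [if_neg h]
      rw [PySem.Set.update, List.foldl_cons, hadd, dedupEx, if_neg h]
      have := ih (s ++ [ip])
      simp only [PySem.Set.update] at this
      rw [this, List.append_assoc]
      refine congrArg (s ++ ·) ?_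
      refine congrArg (fun z => ip :: z) (dedupEx_congr rest _ _ ?_)
      intro x
      rw [PySem.Set.mem_add]
      simp

theorem dedup_eq_dedupEx (l : List String) :
    PySem.List.dedup l = dedupEx PySem.Set.empty l := by
  have h := update_eq_dedupEx l PySem.Set.empty
  simpa [PySem.Set.update, PySem.Set.empty, PySem.List.dedup_eq_ofList,
    PySem.Set.ofList_eq_foldl] using h

theorem remove?_dedupEx (l : List String) (s : PySem.Set String) (p : String)
    (hps : p ∉ s) (hpl : p ∈ l) :
    PySem.List.remove? (dedupEx s l) p = some (dedupEx (PySem.Set.add s p) l) := by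
  induction l generalizing s with
  | nil => cases hpl
  | cons ip rest ih =>
    by_cases h : PySem.Set.contains s ip = true
    · have hmem : ip ∈ s := (PySem.Set.contains_iff s ip).1 h
      have hne : ip ≠ p := fun he => hps (he ▸ hmem)
      have hprest : p ∈ rest := by
        cases hpl with
        | head => exact absurd rfl hne
        | tail _ h' => exact h'
      have h' : PySem.Set.contains (PySem.Set.add s p) ip = true := by
        rw [PySem.Set.contains_iff]; rw [PySem.Set.mem_add]; exact Or.inl hmem
      rw [dedupEx, if_pos h, dedupEx, if_pos h']
      exact ih s hps hprest
    · have hcs : PySem.Set.contains s ip = false := by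
        cases hcs : PySem.Set.contains s ip with
        | true => exact absurd hcs h
        | false => rfl
      by_cases hip : ip = p
      · subst hip
        have h' : PySem.Set.contains (PySem.Set.add s ip) ip = true := by
          rw [PySem.Set.contains_iff, PySem.Set.mem_add]; exact Or.inr rfl
        rw [dedupEx, if_neg (by rw [hcs]; exact Bool.false_ne_true), dedupEx, if_pos h',
          PySem.List.remove?_cons_self]
      · have hprest : p ∈ rest := by
          cases hpl with
          | head => exact absurd rfl (Ne.symm hip)
          | tail _ h' => exact h'
        have hips : ip ∉ s := fun hx => h ((PySem.Set.contains_iff s ip).2 hx)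
        have h'' : PySem.Set.contains (PySem.Set.add s p) ip = false := by
          cases hct : PySem.Set.contains (PySem.Set.add s p) ip with
          | true =>
            have := (PySem.Set.contains_iff _ ip).1 hct
            rw [PySem.Set.mem_add] at this
            cases this with
            | inl hx => exact absurd hx hips
            | inr hx => exact absurd hx hip
          | false => rfl
        rw [dedupEx, if_neg (by rw [hcs]; exact Bool.false_ne_true), dedupEx,
          if_neg (by rw [h'']; exact Bool.false_ne_true),
          PySem.List.remove?_cons_of_ne _ hip]
        have hps' : p ∉ PySem.Set.add s ip := by
          rw [PySem.Set.mem_add]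
          rintro (hx | hx)
          · exact hps hx
          · exact hip hx.symm
        rw [ih (PySem.Set.add s ip) hps' hprest]
        simp only [Option.map_some]
        refine congrArg (fun z => some (ip :: z)) (dedupEx_congr rest _ _ ?_)
        intro x; rw [PySem.Set.mem_add, PySem.Set.mem_add, PySem.Set.mem_add, PySem.Set.mem_add]
        tauto

-- ===== VERDICT (by name: the statement is the Claim_ definition above) =====
theorem prioritize_candidate_ips_spec : Claim_equal_prioritize_candidate_ips := by
  intro ips p _
  unfold Spec_prioritize_candidate_ips prioritize_candidate_ips prioritize_candidate_ips_alt
  by_cases hp : p ∈ ips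
  · have hc : ips.contains p = true := by simpa using hp
    have hc' : (PySem.List.dedup ips).contains p = true := by
      simp [hp]
    simp only [hc, hc', if_true]
    rw [foldl_eq_dedupEx]
    have hrem := remove?_dedupEx ips PySem.Set.empty p (by simp [PySem.Set.empty]) hp
    rw [dedup_eq_dedupEx, hrem]
    simp [PySem.List.insert_zero]
  · have hc : ips.contains p = false := by simpa using hp
    have hc' : (PySem.List.dedup ips).contains p = false := by
      simp [hp]
    simp only [hc, hc', Bool.false_eq_true, if_false]
    rw [foldl_eq_dedupEx, dedup_eq_dedupEx]
    rfl
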